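-- pv_equiv track=rewrite | github.com/Teffa14/AutoPTU | auto_ptu/csv_repository.py | _default_form_score
-- ===== SOURCE A (Python) =====
-- def _default_form_score(form_key: str) -> int:
--     if not form_key:
--         return 200
--     tokens = [token for token in form_key.split() if token]
--     score = 0
--     default_tokens = {
--         "normal",
--         "base",
--         "standard",
--         "average",
--         "solo",
--         "midday",
--         "altered",
--         "incarnate",
--         "hero",
--         "50",
--     }
--     minor_tokens = {"male", "female", "day"}
--     mega_tokens = {"mega", "primal", "gmax", "gigantamax"}
--     if any(token in default_tokens for token in tokens):
--         score += 80
--     if any(token in {"n", "default"} for token in tokens):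
--         score += 60
--     if any(token in minor_tokens for token in tokens):
--         score += 10
--     if any(token in mega_tokens for token in tokens):
--         score -= 100
--     return score
-- ===== SOURCE B (Python) =====
-- def _default_form_score(form_key: str) -> int:
--     if not form_key:
--         return 200
--     has_default = has_named_default = has_minor = has_mega = False
--     for token in form_key.split():
--         if not token:
--             continue
--         if token in ("normal", "base", "standard", "average", "solo",
--                      "midday", "altered", "incarnate", "hero", "50"):
--             has_default = True
--         elif token in ("n", "default"):
--             has_named_default = True
--         elif token in ("male", "female", "day"):
--             has_minor = True
--         elif token in ("mega", "primal", "gmax", "gigantamax"):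
--             has_mega = True
--     return ((80 if has_default else 0)
--             + (60 if has_named_default else 0)
--             + (10 if has_minor else 0)
--             - (100 if has_mega else 0))
-- ===== Notes on version B (the rewrite author's own statement) =====
-- stated objective: alternative
-- what changed: Replaces A's four independent any(...) scans over the token list with a single pass that classifies each token once into one of four boolean flags, then combines the flags into the score.
import Mathlib
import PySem

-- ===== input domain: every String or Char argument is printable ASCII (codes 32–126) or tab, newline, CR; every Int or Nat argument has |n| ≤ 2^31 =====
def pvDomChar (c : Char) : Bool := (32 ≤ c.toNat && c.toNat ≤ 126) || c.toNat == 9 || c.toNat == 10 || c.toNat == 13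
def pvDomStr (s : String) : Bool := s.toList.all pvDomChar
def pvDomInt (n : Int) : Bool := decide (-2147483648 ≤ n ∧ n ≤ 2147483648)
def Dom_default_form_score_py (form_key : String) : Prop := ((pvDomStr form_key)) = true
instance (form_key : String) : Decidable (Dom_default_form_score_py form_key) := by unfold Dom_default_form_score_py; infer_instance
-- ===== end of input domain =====

-- B replaces A's four separate any(...) membership scans with one pass over the
-- tokens setting four flags (alternative decomposition, same cost class).

-- ===== PORT A =====
def default_form_score_py (form_key : String) : Int :=
  if form_key = "" then 200
  else
    let tokens := (PySem.Str.split₀ form_key).filter (fun t => t ≠ "")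
    let score : Int := 0
    let score := if tokens.any (fun t =>
      (["normal", "base", "standard", "average", "solo", "midday",
        "altered", "incarnate", "hero", "50"] : List String).contains t)
      then score + 80 else score
    let score := if tokens.any (fun t =>
      (["n", "default"] : List String).contains t)
      then score + 60 else score
    let score := if tokens.any (fun t =>
      (["male", "female", "day"] : List String).contains t)
      then score + 10 else score
    let score := if tokens.any (fun t =>
      (["mega", "primal", "gmax", "gigantamax"] : List String).contains t)
      then score - 100 else score
    score

-- ===== PORT B =====
def pvStep (st : Bool × Bool × Bool × Bool) (t : String) : Bool × Bool × Bool × Bool :=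
  if t = "" then st
  else if (["normal", "base", "standard", "average", "solo", "midday",
            "altered", "incarnate", "hero", "50"] : List String).contains t then
    (true, st.2.1, st.2.2.1, st.2.2.2)
  else if (["n", "default"] : List String).contains t then
    (st.1, true, st.2.2.1, st.2.2.2)
  else if (["male", "female", "day"] : List String).contains t then
    (st.1, st.2.1, true, st.2.2.2)
  else if (["mega", "primal", "gmax", "gigantamax"] : List String).contains t then
    (st.1, st.2.1, st.2.2.1, true)
  else st

def default_form_score_py_alt (form_key : String) : Int :=
  if form_key = "" then 200
  else
    let st := (PySem.Str.split₀ form_key).foldl pvStep (false, false, false, false)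
    (if st.1 then (80 : Int) else 0)
      + (if st.2.1 then 60 else 0)
      + (if st.2.2.1 then 10 else 0)
      - (if st.2.2.2 then 100 else 0)

-- ===== PRECONDITION & SPEC =====
def Spec_default_form_score_py (form_key : String) (out : Int) : Prop := out = default_form_score_py_alt form_key
instance (form_key : String) (out : Int) : Decidable (Spec_default_form_score_py form_key out) := by unfold Spec_default_form_score_py; infer_instance

-- ===== CLAIM (what is proved, stated in full; the proofs are below) =====
def Claim_equal_default_form_score_py : Prop := ∀ (form_key : String), Dom_default_form_score_py form_key → Spec_default_form_score_py form_key (default_form_score_py form_key)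

-- ===== LEMMAS AND PROOFS =====

def pvC1 (t : String) : Bool :=
  (["normal", "base", "standard", "average", "solo", "midday",
    "altered", "incarnate", "hero", "50"] : List String).contains t
def pvC2 (t : String) : Bool := (["n", "default"] : List String).contains t
def pvC3 (t : String) : Bool := (["male", "female", "day"] : List String).contains t
def pvC4 (t : String) : Bool :=
  (["mega", "primal", "gmax", "gigantamax"] : List String).contains t

-- the one-pass fold computes exactly the four membership "any"s
theorem pvStep_fold (l : List String) (d n m g : Bool) :
    l.foldl pvStep (d, n, m, g)
      = (d || l.any pvC1,
         n || l.any (fun t => !pvC1 t && pvC2 t),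
         m || l.any (fun t => !pvC1 t && !pvC2 t && pvC3 t),
         g || l.any (fun t => !pvC1 t && !pvC2 t && !pvC3 t && pvC4 t)) := by
  induction l generalizing d n m g with
  | nil => simp
  | cons t l ih =>
    simp only [List.foldl_cons, List.any_cons, pvStep]
    split_ifs with h1 h2 h3 h4 h5
    · subst h1
      rw [ih]
      simp [show pvC1 "" = false from by decide, show pvC2 "" = false from by decide,
        show pvC3 "" = false from by decide, show pvC4 "" = false from by decide]
    · replace h2 : pvC1 t = true := h2
      rw [ih]; simp [h2]
    · replace h2 : pvC1 t = false := Bool.eq_false_iff.mpr h2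
      replace h3 : pvC2 t = true := h3
      rw [ih]; simp [h2, h3]
    · replace h2 : pvC1 t = false := Bool.eq_false_iff.mpr h2
      replace h3 : pvC2 t = false := Bool.eq_false_iff.mpr h3
      replace h4 : pvC3 t = true := h4
      rw [ih]; simp [h2, h3, h4]
    · replace h2 : pvC1 t = false := Bool.eq_false_iff.mpr h2
      replace h3 : pvC2 t = false := Bool.eq_false_iff.mpr h3
      replace h4 : pvC3 t = false := Bool.eq_false_iff.mpr h4
      replace h5 : pvC4 t = true := h5
      rw [ih]; simp [h2, h3, h4, h5]
    · replace h2 : pvC1 t = false := Bool.eq_false_iff.mpr h2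
      replace h3 : pvC2 t = false := Bool.eq_false_iff.mpr h3
      replace h4 : pvC3 t = false := Bool.eq_false_iff.mpr h4
      replace h5 : pvC4 t = false := Bool.eq_false_iff.mpr h5
      rw [ih]; simp [h2, h3, h4, h5]

theorem pv_disj12 (t : String) (h : pvC2 t = true) : pvC1 t = false := by
  simp only [pvC2, List.contains_eq_mem, decide_eq_true_eq, List.mem_cons,
    List.not_mem_nil, or_false] at h
  rcases h with rfl | rfl <;> decide

theorem pv_disj3 (t : String) (h : pvC3 t = true) : pvC1 t = false ∧ pvC2 t = false := by
  simp only [pvC3, List.contains_eq_mem, decide_eq_true_eq, List.mem_cons,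
    List.not_mem_nil, or_false] at h
  rcases h with rfl | rfl | rfl <;> exact ⟨by decide, by decide⟩

theorem pv_disj4 (t : String) (h : pvC4 t = true) :
    pvC1 t = false ∧ pvC2 t = false ∧ pvC3 t = false := by
  simp only [pvC4, List.contains_eq_mem, decide_eq_true_eq, List.mem_cons,
    List.not_mem_nil, or_false] at h
  rcases h with rfl | rfl | rfl | rfl <;> exact ⟨by decide, by decide, by decide⟩

theorem pv_q2 : (fun t => !pvC1 t && pvC2 t) = pvC2 := by
  funext t
  cases h : pvC2 t
  · simp
  · simp [pv_disj12 t h]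

theorem pv_q3 : (fun t => !pvC1 t && !pvC2 t && pvC3 t) = pvC3 := by
  funext t
  cases h : pvC3 t
  · simp
  · obtain ⟨h1, h2⟩ := pv_disj3 t h
    simp [h1, h2]

theorem pv_q4 : (fun t => !pvC1 t && !pvC2 t && !pvC3 t && pvC4 t) = pvC4 := by
  funext t
  cases h : pvC4 t
  · simp
  · obtain ⟨h1, h2, h3⟩ := pv_disj4 t h
    simp [h1, h2, h3]

-- A's filter of empty tokens is a no-op for each membership test ("" is in no set)
theorem pv_any_guard (p : String → Bool) (hp : p "" = false) (l : List String) :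
    (l.any fun a => !decide (a = "") && p a) = l.any p := by
  induction l with
  | nil => rfl
  | cons t l ih => by_cases h : t = "" <;> simp [h, hp, ih]

theorem pv_any_filter (l : List String) (p : String → Bool) (hp : p "" = false) :
    (l.filter (fun t => t ≠ "")).any p = l.any p := by
  rw [List.any_filter]
  simp only [ne_eq, decide_not]
  exact pv_any_guard p hp l

-- ===== VERDICT (by name: the statement is the Claim_ definition above) =====
theorem default_form_score_py_spec : Claim_equal_default_form_score_py := by
  intro form_key _
  unfold Spec_default_form_score_py default_form_score_py default_form_score_py_alt
  by_cases h : form_key = ""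
  · simp [h]
  · simp only [h, if_false]
    rw [pvStep_fold, pv_q2, pv_q3, pv_q4]
    rw [show (fun t =>
        (["normal", "base", "standard", "average", "solo", "midday",
          "altered", "incarnate", "hero", "50"] : List String).contains t) = pvC1 from rfl,
      show (fun t => (["n", "default"] : List String).contains t) = pvC2 from rfl,
      show (fun t => (["male", "female", "day"] : List String).contains t) = pvC3 from rfl,
      show (fun t =>
        (["mega", "primal", "gmax", "gigantamax"] : List String).contains t) = pvC4 from rfl]
    rw [pv_any_filter _ pvC1 rfl, pv_any_filter _ pvC2 rfl,
      pv_any_filter _ pvC3 rfl, pv_any_filter _ pvC4 rfl]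
    simp only [Bool.false_or]
    generalize (PySem.Str.split₀ form_key).any pvC1 = b1
    generalize (PySem.Str.split₀ form_key).any pvC2 = b2
    generalize (PySem.Str.split₀ form_key).any pvC3 = b3
    generalize (PySem.Str.split₀ form_key).any pvC4 = b4
    cases b1 <;> cases b2 <;> cases b3 <;> cases b4 <;> norm_num
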